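-- pv_equiv track=rewrite | github.com/AbdulRehman377/Streamlit_Final | enhanced_chunker.py | _should_collapse_rows
-- ===== SOURCE A (Python) =====
-- from typing import List, Dict, Optional
--
-- def _should_collapse_rows(grid: List[List], header_rows: set) -> bool:
--     """
--     Determine if a table has continuation rows that should be collapsed.
--
--     A table needs collapsing if:
--     - There are data rows (not headers) with empty column 0
--     - These empty column 0 rows appear after a row with non-empty column 0
--
--     This handles tables where multi-line cells are split into separate rows
--     by Azure DI (e.g., address fields, item descriptions with sub-items).
--     """
--     if not grid or len(grid) < 2:
--         return False
--
--     has_parent_row = False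
--     has_continuation_row = False
--
--     for row_idx, row in enumerate(grid):
--         # Skip header rows
--         if row_idx in header_rows:
--             continue
--
--         col0_value = (row[0] or "").strip() if row else ""
--
--         if col0_value:
--             has_parent_row = True
--         else:
--             # Empty column 0 in a data row = potential continuation
--             if has_parent_row:
--                 has_continuation_row = True
--
--     return has_parent_row and has_continuation_row
-- ===== SOURCE B (Python) =====
-- def _should_collapse_rows(grid, header_rows):
--     if not grid or len(grid) < 2:
--         return False
--
--     def col0(row):
--         return (row[0] or "").strip() if row else ""
--
--     data = [row for idx, row in enumerate(grid) if idx not in header_rows]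
--     parent_idx = next((i for i, row in enumerate(data) if col0(row)), None)
--     if parent_idx is None:
--         return False
--     return any(not col0(row) for row in data[parent_idx + 1:])
-- ===== Notes on version B (the rewrite author's own statement) =====
-- stated objective: alternative
-- what changed: Replaces the single flag-accumulating pass (has_parent/has_continuation booleans) with two phases: find the index of the first non-header row with non-empty column 0, then search only the suffix after it for an empty-column-0 row, returning early.
import Mathlib
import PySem

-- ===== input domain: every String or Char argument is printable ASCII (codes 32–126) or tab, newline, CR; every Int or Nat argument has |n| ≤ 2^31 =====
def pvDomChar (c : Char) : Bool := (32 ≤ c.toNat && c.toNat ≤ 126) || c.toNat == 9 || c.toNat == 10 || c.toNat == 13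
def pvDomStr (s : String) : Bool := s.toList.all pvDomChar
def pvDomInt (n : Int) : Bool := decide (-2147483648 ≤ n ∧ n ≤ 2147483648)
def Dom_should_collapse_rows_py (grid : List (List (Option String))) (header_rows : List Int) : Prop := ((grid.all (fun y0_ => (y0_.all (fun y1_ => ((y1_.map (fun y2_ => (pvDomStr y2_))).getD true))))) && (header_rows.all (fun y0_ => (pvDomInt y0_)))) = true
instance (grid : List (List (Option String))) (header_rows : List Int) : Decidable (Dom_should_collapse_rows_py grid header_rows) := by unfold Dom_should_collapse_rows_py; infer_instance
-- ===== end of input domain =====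

-- B restructures A's single flag-accumulating pass into find-first-parent + suffix search; objective: alternative (same cost).

-- ===== PORT A =====
-- col0_value = (row[0] or "").strip() if row else ""   ((s or "") = s when s = "" too, so Option.getD "" is exact)
def pvCol0 (row : List (Option String)) : String :=
  match row with
  | [] => ""
  | c :: _ => PySem.Str.strip (c.getD "")

def should_collapse_rows_py (grid : List (List (Option String))) (header_rows : List Int) : Bool :=
  if grid.isEmpty || grid.length < 2 then false
  else
    let st := (PySem.List.enumerate grid).foldl
      (fun (st : Bool × Bool) p =>
        if header_rows.contains p.1 then st
        else
          let col0 := pvCol0 p.2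
          if col0 ≠ "" then (true, st.2)
          else if st.1 then (st.1, true) else st)
      (false, false)
    st.1 && st.2

-- ===== PORT B =====
def should_collapse_rows_py_alt (grid : List (List (Option String))) (header_rows : List Int) : Bool :=
  if grid.isEmpty || grid.length < 2 then false
  else
    let data := ((PySem.List.enumerate grid).filter (fun p => !header_rows.contains p.1)).map (·.2)
    match data.findIdx? (fun row => pvCol0 row ≠ "") with
    | none => false
    | some i => (data.drop (i + 1)).any (fun row => pvCol0 row = "")

-- ===== PRECONDITION & SPEC =====
def Spec_should_collapse_rows_py (grid : List (List (Option String))) (header_rows : List Int) (out : Bool) : Prop := out = should_collapse_rows_py_alt grid header_rows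
instance (grid : List (List (Option String))) (header_rows : List Int) (out : Bool) : Decidable (Spec_should_collapse_rows_py grid header_rows out) := by unfold Spec_should_collapse_rows_py; infer_instance

-- ===== CLAIM (what is proved, stated in full; the proofs are below) =====
def Claim_equal_should_collapse_rows_py : Prop := ∀ (grid : List (List (Option String))) (header_rows : List Int), Dom_should_collapse_rows_py grid header_rows → Spec_should_collapse_rows_py grid header_rows (should_collapse_rows_py grid header_rows)

-- ===== LEMMAS AND PROOFS =====

-- the loop body of A, abstracted over the data row only
def pvStep (st : Bool × Bool) (row : List (Option String)) : Bool × Bool :=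
  if pvCol0 row ≠ "" then (true, st.2)
  else if st.1 then (st.1, true) else st

-- B's core on the filtered data rows
def pvFind (data : List (List (Option String))) : Bool :=
  match data.findIdx? (fun row => pvCol0 row ≠ "") with
  | none => false
  | some i => (data.drop (i + 1)).any (fun row => pvCol0 row = "")

lemma foldl_skip_eq_filter (header_rows : List Int)
    (l : List (Int × List (Option String))) (init : Bool × Bool) :
    l.foldl
      (fun (st : Bool × Bool) p =>
        if header_rows.contains p.1 then st
        else
          let col0 := pvCol0 p.2
          if col0 ≠ "" then (true, st.2)
          else if st.1 then (st.1, true) else st) init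
      = ((l.filter (fun p => !header_rows.contains p.1)).map (·.2)).foldl pvStep init := by
  induction l generalizing init with
  | nil => rfl
  | cons h t ih =>
    cases hc : header_rows.contains h.1
    · simp only [List.foldl_cons, List.filter_cons, hc, Bool.not_false, Bool.false_eq_true,
        if_false, if_true, List.map_cons]
      exact ih _
    · simp only [List.foldl_cons, List.filter_cons, hc, Bool.not_true, Bool.false_eq_true,
        if_false, if_true]
      exact ih _

lemma foldl_step_true (data : List (List (Option String))) (b : Bool) :
    data.foldl pvStep (true, b) = (true, (b || data.any (fun row => pvCol0 row = ""))) := by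
  induction data generalizing b with
  | nil => simp
  | cons h t ih =>
    by_cases hp : pvCol0 h = "" <;>
      simp [pvStep, hp, ih]

lemma foldl_step_eq_find (data : List (List (Option String))) :
    ((data.foldl pvStep (false, false)).1 && (data.foldl pvStep (false, false)).2)
      = pvFind data := by
  induction data with
  | nil => rfl
  | cons h t ih =>
    by_cases hp : pvCol0 h = ""
    · rw [List.foldl_cons, show pvStep (false, false) h = (false, false) by simp [pvStep, hp], ih]
      simp only [pvFind, List.findIdx?_cons, hp]
      cases hf : t.findIdx? (fun row => decide ¬(pvCol0 row = "")) <;>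
        simp [List.drop_succ_cons]
    · rw [List.foldl_cons, show pvStep (false, false) h = (true, false) by simp [pvStep, hp],
        foldl_step_true]
      simp [pvFind, List.findIdx?_cons, hp]

-- ===== VERDICT (by name: the statement is the Claim_ definition above) =====
theorem should_collapse_rows_py_spec : Claim_equal_should_collapse_rows_py := by
  intro grid header_rows _
  unfold Spec_should_collapse_rows_py should_collapse_rows_py should_collapse_rows_py_alt
  split_ifs with hg
  · rfl
  · rw [foldl_skip_eq_filter, foldl_step_eq_find]
    rfl
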